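-- pv_equiv track=rewrite | github.com/kaajjaak/AgendaGrapher | util/grouper.py | map_activities
-- ===== SOURCE A (Python) =====
-- def map_activities(input_dict, activity_groups):
--     output_dict = {}
--     for day, activities in input_dict.items():
--         mapped_activities = []
--         for activity, duration in activities:
--             group_found = False
--             for group, group_activities in activity_groups.items():
--                 if activity in group_activities:
--                     mapped_activities.append((group, duration))
--                     group_found = True
--                     break
--             if not group_found:
--                 mapped_activities.append((activity, duration))
--         output_dict[day] = mapped_activities
--     return output_dict
-- ===== SOURCE B (Python) =====
-- def map_activities(input_dict, activity_groups):
--     lookup = {}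
--     for group, group_activities in activity_groups.items():
--         for act in group_activities:
--             lookup.setdefault(act, group)
--     return {day: [(lookup.get(a, a), d) for a, d in activities]
--             for day, activities in input_dict.items()}
-- ===== Notes on version B (the rewrite author's own statement) =====
-- stated objective: faster
-- what changed: B precomputes a single activity-to-first-group dict from activity_groups (setdefault keeps the first group), replacing A's per-activity linear scan over all groups' activity lists with one O(1) lookup.
import Mathlib
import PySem

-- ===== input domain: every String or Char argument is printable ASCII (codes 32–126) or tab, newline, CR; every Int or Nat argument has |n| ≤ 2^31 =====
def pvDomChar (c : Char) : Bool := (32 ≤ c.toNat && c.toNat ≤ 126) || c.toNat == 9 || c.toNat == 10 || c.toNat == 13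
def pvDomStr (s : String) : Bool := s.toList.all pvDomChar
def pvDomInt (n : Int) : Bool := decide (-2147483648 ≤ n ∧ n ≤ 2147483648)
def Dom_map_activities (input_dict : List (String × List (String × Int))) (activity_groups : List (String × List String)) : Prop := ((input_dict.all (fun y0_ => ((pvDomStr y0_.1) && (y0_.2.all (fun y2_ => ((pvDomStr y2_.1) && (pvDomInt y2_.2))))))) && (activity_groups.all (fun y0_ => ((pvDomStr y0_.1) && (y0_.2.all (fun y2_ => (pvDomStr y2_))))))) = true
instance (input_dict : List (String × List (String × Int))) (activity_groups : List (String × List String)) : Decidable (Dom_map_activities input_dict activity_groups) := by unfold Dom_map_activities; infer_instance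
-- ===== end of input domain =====

-- B replaces A's per-activity linear scan over all groups with one precomputed
-- activity-to-first-group dict lookup (objective: faster, asymptotic).

-- ===== PORT A =====
-- A's inner 'for group ... if activity in group_activities: append; break' loop
-- with its group_found flag: first group whose list contains the activity, as an Option.
def pvFindGroup (activity : String) : List (String × List String) → Option String
  | [] => none
  | (group, group_activities) :: rest =>
      if group_activities.contains activity then some group
      else pvFindGroup activity rest

def map_activities (input_dict : List (String × List (String × Int))) (activity_groups : List (String × List String)) : List (String × List (String × Int)) :=
  (input_dict.foldl (fun output_dict p =>
      output_dict.insert p.1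
        (p.2.foldl (fun mapped_activities q =>
            match pvFindGroup q.1 activity_groups with
            | some group => mapped_activities ++ [(group, q.2)]
            | none => mapped_activities ++ [(q.1, q.2)]) []))
    PySem.Dict.empty).items

-- ===== PORT B =====
-- lookup = {}; for group, acts in activity_groups.items(): for act in acts: lookup.setdefault(act, group)
def pvLookup (activity_groups : List (String × List String)) : PySem.Dict String String :=
  activity_groups.foldl (fun lookup p =>
    p.2.foldl (fun lookup act => lookup.setdefault act p.1) lookup) PySem.Dict.empty

def map_activities_alt (input_dict : List (String × List (String × Int))) (activity_groups : List (String × List String)) : List (String × List (String × Int)) :=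
  let lookup := pvLookup activity_groups
  (input_dict.foldl (fun out p =>
      out.insert p.1 (p.2.map (fun q => (lookup.getD q.1 q.1, q.2))))
    PySem.Dict.empty).items

-- ===== PRECONDITION & SPEC =====
def Spec_map_activities (input_dict : List (String × List (String × Int))) (activity_groups : List (String × List String)) (out : List (String × List (String × Int))) : Prop := out = map_activities_alt input_dict activity_groups
instance (input_dict : List (String × List (String × Int))) (activity_groups : List (String × List String)) (out : List (String × List (String × Int))) : Decidable (Spec_map_activities input_dict activity_groups out) := by unfold Spec_map_activities; infer_instance

-- ===== CLAIM (what is proved, stated in full; the proofs are below) =====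
def Claim_equal_map_activities : Prop := ∀ (input_dict : List (String × List (String × Int))) (activity_groups : List (String × List String)), Dom_map_activities input_dict activity_groups → Spec_map_activities input_dict activity_groups (map_activities input_dict activity_groups)

-- ===== LEMMAS AND PROOFS =====

-- One setdefault: lookup after it is the old lookup, falling back to the new binding.
theorem pv_get?_setdefault (d : PySem.Dict String String) (x g a : String) :
    (d.setdefault x g).get? a = (d.get? a).or (if x = a then some g else none) := by
  by_cases hc : d.contains x = true
  · rw [PySem.Dict.setdefault_of_contains _ _ hc]
    by_cases hxa : x = a
    · subst hxa
      rcases ho : d.get? x with _ | v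
      · rw [PySem.Dict.contains_eq_isSome_get?, ho] at hc; simp at hc
      · simp
    · simp [hxa]
  · rw [PySem.Dict.setdefault_of_not_contains _ _ (by simpa using hc)]
    by_cases hxa : x = a
    · subst hxa
      rw [PySem.Dict.get?_insert_self]
      have : d.get? x = none := by
        rw [PySem.Dict.contains_eq_isSome_get?] at hc
        cases h : d.get? x <;> simp [h] at hc ⊢
      simp [this]
    · rw [PySem.Dict.get?_insert_of_ne _ _ (fun h => hxa h.symm)]
      simp [hxa]

-- The setdefault loop over one group's activity list.
theorem pv_get?_setdefault_fold (acts : List String) (g a : String)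
    (d : PySem.Dict String String) :
    (acts.foldl (fun lookup act => lookup.setdefault act g) d).get? a =
      (d.get? a).or (if acts.contains a then some g else none) := by
  induction acts generalizing d with
  | nil => simp
  | cons x t ih =>
      simp only [List.foldl_cons, ih, pv_get?_setdefault]
      rcases ho : d.get? a with _ | v
      · by_cases hxa : x = a
        · simp [hxa]
        · have hax : ¬ a = x := fun h => hxa h.symm
          simp [hxa, hax]
      · simp
  
-- The whole lookup-building loop computes exactly A's first-match scan.
theorem pv_get?_pvLookup_fold (groups : List (String × List String)) (a : String)
    (d : PySem.Dict String String) :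
    (groups.foldl (fun lookup p =>
        p.2.foldl (fun lookup act => lookup.setdefault act p.1) lookup) d).get? a =
      (d.get? a).or (pvFindGroup a groups) := by
  induction groups generalizing d with
  | nil => simp [pvFindGroup]
  | cons p t ih =>
      simp only [List.foldl_cons, ih, pv_get?_setdefault_fold, pvFindGroup, Option.or_assoc]
      by_cases h : a ∈ p.2 <;> simp [h]

theorem pv_get?_pvLookup (groups : List (String × List String)) (a : String) :
    (pvLookup groups).get? a = pvFindGroup a groups := by
  simp [pvLookup, pv_get?_pvLookup_fold]

-- Per-activity agreement: A's match on the scan equals B's dict lookup with default.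
theorem pv_entry_eq (groups : List (String × List String)) (q : String × Int) :
    (match pvFindGroup q.1 groups with
      | some group => (group, q.2)
      | none => (q.1, q.2)) = ((pvLookup groups).getD q.1 q.1, q.2) := by
  rw [PySem.Dict.getD_eq_get?_getD, pv_get?_pvLookup]
  cases pvFindGroup q.1 groups <;> simp

-- A's inner append loop builds exactly B's map.
theorem pv_inner_eq (groups : List (String × List String)) (acts : List (String × Int)) :
    acts.foldl (fun mapped q =>
        match pvFindGroup q.1 groups with
        | some group => mapped ++ [(group, q.2)]
        | none => mapped ++ [(q.1, q.2)]) [] =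
      acts.map (fun q => ((pvLookup groups).getD q.1 q.1, q.2)) := by
  have h : acts.foldl (fun mapped q =>
        match pvFindGroup q.1 groups with
        | some group => mapped ++ [(group, q.2)]
        | none => mapped ++ [(q.1, q.2)]) [] =
      acts.foldl (fun mapped q =>
        mapped ++ [((pvLookup groups).getD q.1 q.1, q.2)]) [] := by
    apply PySem.List.foldl_congr_mem
    intro acc q _
    rw [← pv_entry_eq]
    cases pvFindGroup q.1 groups <;> rfl
  rw [h, PySem.List.foldl_append_singleton_eq_map]
  simp

-- ===== VERDICT (by name: the statement is the Claim_ definition above) =====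
theorem map_activities_spec : Claim_equal_map_activities := by
  intro input_dict activity_groups _
  unfold Spec_map_activities map_activities map_activities_alt
  congr 1
  apply PySem.List.foldl_congr_mem
  intro acc p _
  rw [pv_inner_eq]
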